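-- pv_equiv track=rewrite | github.com/erciktiburak/jacobi-mpi-solver | jacobi_parallel.py | compute_row_distribution
-- ===== SOURCE A (Python) =====
-- def compute_row_distribution(N, num_procs):
--
--     base_rows = N // num_procs
--     extra = N % num_procs
--
--     counts = []
--     displacements = []
--     current_displacement = 0
--
--     for p in range(num_procs):
--         rows_for_p = base_rows + (1 if p < extra else 0)
--         counts.append(rows_for_p)
--         displacements.append(current_displacement)
--         current_displacement += rows_for_p
--
--     return counts, displacements
-- ===== SOURCE B (Python) =====
-- def compute_row_distribution(N, num_procs):
--     base_rows = N // num_procs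
--     extra = N % num_procs
--     counts = [base_rows + (1 if p < extra else 0) for p in range(num_procs)]
--     displacements = [p * base_rows + min(p, extra) for p in range(num_procs)]
--     return counts, displacements
-- ===== Notes on version B (the rewrite author's own statement) =====
-- stated objective: simpler
-- what changed: Replaces the single loop with a running displacement accumulator by two independent comprehensions, computing each displacement directly with the closed form p*base_rows + min(p, extra).
import Mathlib
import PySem

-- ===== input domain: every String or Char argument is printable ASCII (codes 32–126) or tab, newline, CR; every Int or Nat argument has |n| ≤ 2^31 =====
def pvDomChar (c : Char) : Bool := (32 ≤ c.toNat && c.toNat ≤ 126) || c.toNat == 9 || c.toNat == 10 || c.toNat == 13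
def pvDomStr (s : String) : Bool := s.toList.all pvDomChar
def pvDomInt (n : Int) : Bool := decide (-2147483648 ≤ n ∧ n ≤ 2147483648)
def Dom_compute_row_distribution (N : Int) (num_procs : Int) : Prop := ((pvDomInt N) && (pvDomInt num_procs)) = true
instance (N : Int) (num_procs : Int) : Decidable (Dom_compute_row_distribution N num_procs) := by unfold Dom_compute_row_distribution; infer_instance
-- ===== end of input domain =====

-- B drops A's running displacement accumulator: two independent comprehensions, with the
-- closed form p*base_rows + min(p, extra) for each displacement (objective: simpler).

-- ===== PORT A =====
def compute_row_distribution (N : Int) (num_procs : Int) : List Int × List Int :=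
  let base_rows := PySem.Int.floordiv N num_procs
  let extra := PySem.Int.mod N num_procs
  let st :=
    (PySem.List.pyRange 0 num_procs 1).foldl
      (fun (st : List Int × List Int × Int) p =>
        let rows_for_p := base_rows + (if p < extra then 1 else 0)
        (st.1 ++ [rows_for_p], st.2.1 ++ [st.2.2], st.2.2 + rows_for_p))
      ([], [], 0)
  (st.1, st.2.1)

-- ===== PORT B =====
def compute_row_distribution_alt (N : Int) (num_procs : Int) : List Int × List Int :=
  let base_rows := PySem.Int.floordiv N num_procs
  let extra := PySem.Int.mod N num_procs
  ((PySem.List.pyRange 0 num_procs 1).map (fun p => base_rows + (if p < extra then 1 else 0)),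
   (PySem.List.pyRange 0 num_procs 1).map (fun p => p * base_rows + min p extra))

-- ===== PRECONDITION & SPEC =====
-- A raises ZeroDivisionError exactly when num_procs = 0 (N // 0); excluded here.
def Pre_compute_row_distribution (N : Int) (num_procs : Int) : Prop := num_procs ≠ 0
instance (N : Int) (num_procs : Int) : Decidable (Pre_compute_row_distribution N num_procs) := by unfold Pre_compute_row_distribution; infer_instance
def pvWitness_compute_row_distribution : Int × Int := (10, 3)

def Spec_compute_row_distribution (N : Int) (num_procs : Int) (out : List Int × List Int) : Prop := out = compute_row_distribution_alt N num_procs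
instance (N : Int) (num_procs : Int) (out : List Int × List Int) : Decidable (Spec_compute_row_distribution N num_procs out) := by unfold Spec_compute_row_distribution; infer_instance

-- ===== CLAIM (what is proved, stated in full; the proofs are below) =====
def Claim_equal_compute_row_distribution : Prop := ∀ (N : Int) (num_procs : Int), Dom_compute_row_distribution N num_procs → Pre_compute_row_distribution N num_procs → Spec_compute_row_distribution N num_procs (compute_row_distribution N num_procs)

-- ===== LEMMAS AND PROOFS =====

-- Loop invariant: folding A's step over range(0, n) builds exactly B's two maps,
-- and the accumulator equals the closed form n*base + min n extra.
lemma fold_range_eq (base extra : Int) (hx : 0 ≤ extra) : ∀ (n : Nat),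
    (PySem.List.pyRange 0 n 1).foldl
      (fun (st : List Int × List Int × Int) p =>
        (st.1 ++ [base + (if p < extra then 1 else 0)],
         st.2.1 ++ [st.2.2],
         st.2.2 + (base + (if p < extra then 1 else 0))))
      ([], [], 0)
    = ((PySem.List.pyRange 0 n 1).map (fun p => base + (if p < extra then 1 else 0)),
       (PySem.List.pyRange 0 n 1).map (fun p => p * base + min p extra),
       (n : Int) * base + min (n : Int) extra) := by
  intro n
  induction n with
  | zero => simp; omega
  | succ k ih =>
    have h1 : ((k : Int) + 1) = ((k + 1 : Nat) : Int) := by push_cast; ring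
    have hsplit : PySem.List.pyRange 0 ((k+1 : Nat) : Int) 1
        = PySem.List.pyRange 0 (k : Int) 1 ++ [(k : Int)] := by
      rw [← h1, PySem.List.pyRange_one_succ_right (by positivity)]
    rw [hsplit, List.foldl_append, ih]
    simp only [List.foldl_cons, List.foldl_nil, List.map_append, List.map_cons,
      List.map_nil, Prod.mk.injEq]
    refine ⟨by simp, by simp, ?_⟩
    push_cast
    rw [add_one_mul]
    rcases le_or_gt extra (k : Int) with h | h
    · rw [if_neg (by omega)]; omega
    · rw [if_pos h]; omega

lemma neg_range_nil (m : Int) (h : m ≤ 0) : PySem.List.pyRange 0 m 1 = [] :=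
  PySem.List.pyRange_one_eq_nil h

theorem compute_row_distribution_spec : Claim_equal_compute_row_distribution := by
  intro N num_procs _ _
  unfold Spec_compute_row_distribution compute_row_distribution compute_row_distribution_alt
  rcases le_or_gt num_procs 0 with h | h
  · simp [neg_range_nil num_procs h]
  · obtain ⟨n, rfl⟩ : ∃ n : Nat, num_procs = (n : Int) :=
      ⟨num_procs.toNat, (Int.toNat_of_nonneg h.le).symm⟩
    have hx : 0 ≤ PySem.Int.mod N (n : Int) := PySem.Int.mod_nonneg N h
    simp only [fold_range_eq _ _ hx]
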